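-- pv_equiv track=rewrite | github.com/ConorMcNamara/Project-Euleetcode | DataLemur/Microsoft_Rotating_Factorial.py | rotating_factorial
-- ===== SOURCE A (Python) =====
-- def rotating_factorial(n):
--     for i, val in enumerate(range(n, 0, -1)):
--         if i == 0:
--             count = val
--         elif i == 1:
--             count *= val
--         elif i == 2:
--             count = count // val
--         elif i % 4 == 3:
--             count += val
--         elif i % 4 == 0:
--             if val - 2 > 0:
--                 count -= (val * (val - 1)) // (val - 2)
--             else:
--                 count -= (val) * (val - 1)
--         else:
--             continue
--     return count
-- ===== SOURCE B (Python) =====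
-- def rotating_factorial(n):
--     # Closed-form O(1): base = n*(n-1)//(n-2), plus an arithmetic-series sum for the
--     # "+= val" terms and a corrected arithmetic-series sum for the floor-division terms.
--     if n == 1:
--         return 1
--     if n == 2:
--         return 2
--     base = (n * (n - 1)) // (n - 2)
--
--     def series(r, hi):
--         # sum of t and of v over v in [1, hi] with v % 4 == r (t = number of terms)
--         v0 = r if r != 0 else 4
--         if hi < v0:
--             return 0, 0
--         t = (hi - v0) // 4 + 1
--         return t, t * v0 + 2 * t * (t - 1)
--
--     _, plus = series((n - 3) % 4, n - 3)
--
--     tm, sm = series(n % 4, n - 4)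
--     minus = 0
--     if tm > 0:
--         v0 = n % 4 if n % 4 != 0 else 4
--         corr = {1: -2, 2: -1, 3: 2, 4: 1}[v0]
--         minus = sm + tm + corr
--     return base + plus - minus
-- ===== Notes on version B (the rewrite author's own statement) =====
-- stated objective: faster
-- what changed: Replaced the O(n) positional loop by an O(1) closed form: the base value n*(n-1)//(n-2) plus an arithmetic-series formula for the '+= val' terms and a corrected arithmetic-series formula for the floor-division terms (which equal val+1 except for the four smallest values).
-- outside the precondition, e.g. on rotating_factorial(0): A raises UnboundLocalError, B returns 0
import Mathlib
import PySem

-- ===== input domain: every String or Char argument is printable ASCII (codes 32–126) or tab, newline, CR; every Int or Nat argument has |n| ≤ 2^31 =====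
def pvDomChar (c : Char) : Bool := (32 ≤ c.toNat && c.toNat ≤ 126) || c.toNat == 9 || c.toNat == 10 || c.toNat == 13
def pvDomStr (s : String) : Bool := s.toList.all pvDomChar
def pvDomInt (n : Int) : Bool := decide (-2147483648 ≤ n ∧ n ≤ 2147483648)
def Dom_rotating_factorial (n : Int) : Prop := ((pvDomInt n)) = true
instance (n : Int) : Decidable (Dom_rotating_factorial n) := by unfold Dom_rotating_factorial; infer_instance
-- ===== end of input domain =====

-- B replaces A's O(n) positional loop by O(1) closed-form arithmetic-series sums (objective: faster, asymptotic).

-- ===== PORT A =====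
-- A's loop body (the if/elif chain over (i, val)), kept as a named step function for the foldl.
def stepA (count : Int) (iv : Int × Int) : Int :=
  if iv.1 = 0 then iv.2
  else if iv.1 = 1 then count * iv.2
  else if iv.1 = 2 then PySem.Int.floordiv count iv.2
  else if PySem.Int.mod iv.1 4 = 3 then count + iv.2
  else if PySem.Int.mod iv.1 4 = 0 then
    if iv.2 - 2 > 0 then count - PySem.Int.floordiv (iv.2 * (iv.2 - 1)) (iv.2 - 2)
    else count - iv.2 * (iv.2 - 1)
  else count

-- for i, val in enumerate(range(n, 0, -1)): … ; count starts unassigned (Pre_ ensures i = 0 assigns it).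
def rotating_factorial (n : Int) : Int :=
  (PySem.List.enumerate (PySem.List.pyRange n 0 (-1)) 0).foldl stepA 0

-- ===== PORT B =====
-- Source B's helper `series(r, hi)`: (#terms, sum) of v in [1, hi] with v % 4 == r.
def seriesB (r hi : Int) : Int × Int :=
  let v0 := if r ≠ 0 then r else 4
  if hi < v0 then (0, 0)
  else
    let t := PySem.Int.floordiv (hi - v0) 4 + 1
    (t, t * v0 + 2 * t * (t - 1))

-- Source B's dict lookup {1: -2, 2: -1, 3: 2, 4: 1}[v0] (v0 is always in 1..4) as a case analysis.
def corrB (v0 : Int) : Int :=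
  if v0 = 1 then -2 else if v0 = 2 then -1 else if v0 = 3 then 2 else 1

def rotating_factorial_alt (n : Int) : Int :=
  if n = 1 then 1
  else if n = 2 then 2
  else
    let base := PySem.Int.floordiv (n * (n - 1)) (n - 2)
    let plus := (seriesB (PySem.Int.mod (n - 3) 4) (n - 3)).2
    let p := seriesB (PySem.Int.mod n 4) (n - 4)
    let minus :=
      if 0 < p.1 then
        let v0 := if PySem.Int.mod n 4 ≠ 0 then PySem.Int.mod n 4 else 4
        p.2 + p.1 + corrB v0
      else 0
    base + plus - minus

-- ===== PRECONDITION & SPEC =====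
-- For n ≤ 0 the range is empty, `count` is never assigned and A raises UnboundLocalError; Pre_ excludes exactly those inputs.
def Pre_rotating_factorial (n : Int) : Prop := 1 ≤ n
instance (n : Int) : Decidable (Pre_rotating_factorial n) := by unfold Pre_rotating_factorial; infer_instance
def pvWitness_rotating_factorial : Int := (5)

def Spec_rotating_factorial (n : Int) (out : Int) : Prop := out = rotating_factorial_alt n
instance (n : Int) (out : Int) : Decidable (Spec_rotating_factorial n out) := by unfold Spec_rotating_factorial; infer_instance

-- ===== CLAIM (what is proved, stated in full; the proofs are below) =====
def Claim_equal_rotating_factorial : Prop := ∀ (n : Int), Dom_rotating_factorial n → Pre_rotating_factorial n → Spec_rotating_factorial n (rotating_factorial n)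

-- ===== LEMMAS AND PROOFS =====

-- The value A subtracts at indices i ≡ 0 (mod 4).
def fA (v : Int) : Int :=
  if v - 2 > 0 then PySem.Int.floordiv (v * (v - 1)) (v - 2) else v * (v - 1)

-- Exact running sums of A's tail loop (indices i, i+1, … with values m, m-1, …, 1).
def plusSum (i : Int) : Nat → Int
  | 0 => 0
  | m + 1 => (if i % 4 = 3 then ((m : Int) + 1) else 0) + plusSum (i + 1) m

def minusSum (i : Int) : Nat → Int
  | 0 => 0
  | m + 1 => (if i % 4 = 0 then fA ((m : Int) + 1) else 0) + minusSum (i + 1) m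

-- B's minus-part as a function of (r, hi).
def bMinus (r hi : Int) : Int :=
  if 0 < (seriesB r hi).1 then
    (seriesB r hi).2 + (seriesB r hi).1 + corrB (if r ≠ 0 then r else 4)
  else 0

theorem tailFold (m : Nat) : ∀ (i c : Int), 3 ≤ i →
    (PySem.List.enumerate (PySem.List.pyRange (m : Int) 0 (-1)) i).foldl stepA c
      = c + plusSum i m - minusSum i m := by
  induction m with
  | zero =>
      intro i c _
      rw [PySem.List.pyRange_neg_one_eq_nil (by omega)]
      simp [PySem.List.enumerate, plusSum, minusSum]
  | succ m ih =>
      intro i c hi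
      have hcast : ((m + 1 : Nat) : Int) = (m : Int) + 1 := by push_cast; ring
      rw [hcast, PySem.List.pyRange_neg_one_cons (by omega)]
      have hsub : (m : Int) + 1 - 1 = (m : Int) := by ring
      rw [hsub, PySem.List.enumerate_cons, List.foldl_cons, ih (i + 1) _ (by omega)]
      have hmod : PySem.Int.mod i 4 = i % 4 := PySem.Int.mod_eq_emod_of_pos (by omega)
      show stepA c (i, (m : Int) + 1) + plusSum (i + 1) m - minusSum (i + 1) m = _
      have hp : plusSum i (m + 1) = (if i % 4 = 3 then ((m : Int) + 1) else 0) + plusSum (i + 1) m := rfl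
      have hq : minusSum i (m + 1) = (if i % 4 = 0 then fA ((m : Int) + 1) else 0) + minusSum (i + 1) m := rfl
      rw [hp, hq]
      have h0 : ¬ i = 0 := by omega
      have h1 : ¬ i = 1 := by omega
      have h2 : ¬ i = 2 := by omega
      simp only [stepA, hmod, h0, h1, h2, if_false]
      by_cases h3 : i % 4 = 3
      · have h4 : ¬ i % 4 = 0 := by omega
        simp only [h3, h4, if_true]
        norm_num
        ring
      · by_cases h4 : i % 4 = 0
        · simp only [fA, h4, if_true]
          by_cases hv : (m : Int) + 1 - 2 > 0 <;>
            simp only [hv, if_true, if_false] <;> norm_num <;> ring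
        · simp only [h3, h4, if_false]
          ring

-- One step of seriesB: adding the top value hi+1 adds one term exactly when (hi+1) % 4 = r.
theorem seriesB_step (r : Int) (h : Nat) (hr : 0 ≤ r) (hr4 : r < 4) :
    (if ((h : Int) + 1) % 4 = r then
      (seriesB r ((h : Int) + 1)).1 = (seriesB r (h : Int)).1 + 1 ∧
      (seriesB r ((h : Int) + 1)).2 = (seriesB r (h : Int)).2 + ((h : Int) + 1) ∧
      ((h : Int) + 1) = (if r ≠ 0 then r else 4) + 4 * (seriesB r (h : Int)).1
    else seriesB r ((h : Int) + 1) = seriesB r (h : Int)) := by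
  have hh : (0 : Int) ≤ (h : Int) := Int.natCast_nonneg h
  simp only [seriesB]
  set v0 : Int := if r ≠ 0 then r else 4 with hv0
  have hv01 : 1 ≤ v0 ∧ v0 ≤ 4 ∧ v0 % 4 = r % 4 := by
    rw [hv0]; by_cases hz : r = 0 <;> simp [hz] <;> omega
  have hd1 : PySem.Int.floordiv ((h : Int) + 1 - v0) 4 = ((h : Int) + 1 - v0) / 4 :=
    PySem.Int.floordiv_eq_ediv_of_pos (by omega)
  have hd0 : PySem.Int.floordiv ((h : Int) - v0) 4 = ((h : Int) - v0) / 4 :=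
    PySem.Int.floordiv_eq_ediv_of_pos (by omega)
  by_cases hc : ((h : Int) + 1) % 4 = r
  · simp only [hc, if_true]
    have hge : ¬ ((h : Int) + 1 < v0) := by omega
    simp only [hge, if_false, hd1]
    by_cases hlt : (h : Int) < v0
    · -- first term: h+1 = v0
      have hev : (h : Int) + 1 = v0 := by omega
      simp only [hlt, if_true]
      refine ⟨by omega, ?_, by omega⟩
      have : ((h : Int) + 1 - v0) / 4 = 0 := by omega
      simp [this]; omega
    · simp only [hlt, if_false, hd0]
      set q : Int := ((h : Int) - v0) / 4 with hq
      have hq' : ((h : Int) + 1 - v0) / 4 = q + 1 := by omega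
      have hval : (h : Int) + 1 = v0 + 4 * (q + 1) := by omega
      refine ⟨by omega, ?_, by omega⟩
      rw [hq', hval]; ring
  · simp only [hc, if_false]
    by_cases hlt1 : (h : Int) + 1 < v0
    · have hlt0 : (h : Int) < v0 := by omega
      simp [hlt1, hlt0]
    · simp only [hlt1, if_false, hd1]
      by_cases hlt0 : (h : Int) < v0
      · -- h < v0 ≤ h+1 and (h+1) % 4 ≠ r would force h+1 = v0, contradiction
        exfalso; omega
      · simp only [hlt0, if_false, hd0]
        have : ((h : Int) + 1 - v0) / 4 = ((h : Int) - v0) / 4 := by omega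
        rw [this]

-- One step of B's plus-series.
theorem pSeries_step (r : Int) (h : Nat) (hr : 0 ≤ r) (hr4 : r < 4) :
    (seriesB r ((h : Int) + 1)).2
      = (if ((h : Int) + 1) % 4 = r then ((h : Int) + 1) else 0) + (seriesB r (h : Int)).2 := by
  have := seriesB_step r h hr hr4
  by_cases hc : ((h : Int) + 1) % 4 = r
  · simp only [hc, if_true] at this ⊢; omega
  · simp only [hc, if_false] at this ⊢; rw [this]; ring

-- fA v = v + 1 for v ≥ 5 (the floor division is exact up to remainder 2 < v - 2).
theorem fA_large (v : Int) (hv : 5 ≤ v) : fA v = v + 1 := by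
  have h2 : v - 2 > 0 := by omega
  simp only [fA, h2, if_true]
  rw [PySem.Int.floordiv_eq_iff_of_pos (by omega)]
  constructor <;> nlinarith

-- One step of B's minus-part.
theorem bMinus_step (r : Int) (h : Nat) (hr : 0 ≤ r) (hr4 : r < 4) :
    bMinus r ((h : Int) + 1)
      = (if ((h : Int) + 1) % 4 = r then fA ((h : Int) + 1) else 0) + bMinus r (h : Int) := by
  have hstep := seriesB_step r h hr hr4
  have hv01 : 1 ≤ (if r ≠ 0 then r else 4) ∧ (if r ≠ 0 then r else 4) ≤ 4 := by
    by_cases hz : r = 0 <;> simp [hz] <;> omega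
  set v0 : Int := if r ≠ 0 then r else 4 with hv0
  by_cases hc : ((h : Int) + 1) % 4 = r
  · simp only [hc, if_true] at hstep ⊢
    obtain ⟨ht, hs, hval⟩ := hstep
    by_cases ht0 : 0 < (seriesB r (h : Int)).1
    · -- new top value h+1 = v0 + 4t ≥ 5
      have hbig : 5 ≤ (h : Int) + 1 := by omega
      rw [fA_large _ hbig]
      simp only [bMinus, ht0, if_true, ht, hs, ← hv0]
      have : 0 < (seriesB r (h : Int)).1 + 1 := by omega
      simp only [this, if_true]; ring
    · -- first term: h+1 = v0 ∈ {1,2,3,4}; fA v0 = v0 + 1 + corrB v0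
      have ht0' : (seriesB r (h : Int)).1 = 0 := by
        simp only [seriesB, ← hv0] at ht0 ⊢
        by_cases hl : (h : Int) < v0
        · simp [hl]
        · exfalso; apply ht0; simp only [hl, if_false]
          have := PySem.Int.floordiv_eq_ediv_of_pos (show (0:Int) < 4 by omega) (a := (h : Int) - v0)
          omega
      have hs0 : (seriesB r (h : Int)).2 = 0 := by
        simp only [seriesB, ← hv0] at ht0' ⊢
        by_cases hl : (h : Int) < v0
        · simp [hl]
        · simp only [hl, if_false] at ht0' ⊢; rw [ht0']; ring
      have hev : (h : Int) + 1 = v0 := by omega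
      simp only [bMinus, ht, hs, ht0', hs0, ← hv0]
      norm_num
      rw [hev]
      have : fA v0 = v0 + 1 + corrB v0 := by
        have hcase : v0 = 1 ∨ v0 = 2 ∨ v0 = 3 ∨ v0 = 4 := by omega
        rcases hcase with h | h | h | h <;> rw [h] <;> decide
      omega
  · simp only [hc, if_false] at hstep ⊢
    simp only [bMinus, hstep]; ring

-- Closed form for the running plus-sum.
theorem plusSum_closed (m : Nat) : ∀ (i : Int), 3 ≤ i →
    plusSum i m = (seriesB ((i + (m : Int) - 3) % 4) (m : Int)).2 := by
  induction m with
  | zero =>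
      intro i hi
      have hr : 0 ≤ (i + (0:Int) - 3) % 4 ∧ (i + (0:Int) - 3) % 4 < 4 := by omega
      simp only [plusSum, Nat.cast_zero, seriesB]
      have : ((0:Int) < if (i + 0 - 3) % 4 ≠ 0 then (i + 0 - 3) % 4 else 4) := by
        by_cases hz : (i + (0:Int) - 3) % 4 = 0 <;> simp [hz] <;> omega
      simp only [if_pos this]
  | succ m ih =>
      intro i hi
      have hcast : ((m + 1 : Nat) : Int) = (m : Int) + 1 := by push_cast; ring
      rw [hcast]
      set r : Int := (i + ((m : Int) + 1) - 3) % 4 with hrdef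
      have hr0 : 0 ≤ r := by omega
      have hr4 : r < 4 := by omega
      have hr' : (i + 1 + (m : Int) - 3) % 4 = r := by omega
      have := pSeries_step r m hr0 hr4
      rw [show plusSum i (m + 1) = (if i % 4 = 3 then ((m : Int) + 1) else 0) + plusSum (i + 1) m from rfl,
          ih (i + 1) (by omega), hr', this]
      have hcond : (((m : Int) + 1) % 4 = r) ↔ (i % 4 = 3) := by omega
      by_cases h3 : i % 4 = 3
      · simp [h3, hcond.mpr h3]
      · have : ¬ ((m : Int) + 1) % 4 = r := fun hx => h3 (hcond.mp hx)
        simp [h3, this]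

-- Closed form for the running minus-sum.
theorem minusSum_closed (m : Nat) : ∀ (i : Int), 3 ≤ i →
    minusSum i m = bMinus ((i + (m : Int)) % 4) (m : Int) := by
  induction m with
  | zero =>
      intro i hi
      simp only [minusSum, Nat.cast_zero, bMinus, seriesB]
      have : ((0:Int) < if (i + 0) % 4 ≠ 0 then (i + 0) % 4 else 4) := by
        by_cases hz : (i + (0:Int)) % 4 = 0 <;> simp [hz] <;> omega
      simp only [if_pos this]
      norm_num
  | succ m ih =>
      intro i hi
      have hcast : ((m + 1 : Nat) : Int) = (m : Int) + 1 := by push_cast; ring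
      rw [hcast]
      set r : Int := (i + ((m : Int) + 1)) % 4 with hrdef
      have hr0 : 0 ≤ r := by omega
      have hr4 : r < 4 := by omega
      have hr' : (i + 1 + (m : Int)) % 4 = r := by omega
      have := bMinus_step r m hr0 hr4
      rw [show minusSum i (m + 1) = (if i % 4 = 0 then fA ((m : Int) + 1) else 0) + minusSum (i + 1) m from rfl,
          ih (i + 1) (by omega), hr', this]
      have hcond : (((m : Int) + 1) % 4 = r) ↔ (i % 4 = 0) := by omega
      by_cases h4 : i % 4 = 0
      · simp [h4, hcond.mpr h4]
      · have : ¬ ((m : Int) + 1) % 4 = r := fun hx => h4 (hcond.mp hx)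
        simp [h4, this]

-- ===== VERDICT (by name: the statement is the Claim_ definition above) =====
theorem rotating_factorial_spec : Claim_equal_rotating_factorial := by
  intro n _ hpre
  unfold Spec_rotating_factorial
  unfold Pre_rotating_factorial at hpre
  by_cases h1 : n = 1
  · subst h1; decide
  by_cases h2 : n = 2
  · subst h2; decide
  by_cases h3 : n = 3
  · subst h3; decide
  -- now n ≥ 4
  have hn : 4 ≤ n := by omega
  -- unroll A's first three iterations
  have e1 : PySem.List.pyRange n 0 (-1) = n :: PySem.List.pyRange (n - 1) 0 (-1) :=
    PySem.List.pyRange_neg_one_cons (by omega)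
  have e2 : PySem.List.pyRange (n - 1) 0 (-1) = (n - 1) :: PySem.List.pyRange (n - 1 - 1) 0 (-1) :=
    PySem.List.pyRange_neg_one_cons (by omega)
  have e3 : PySem.List.pyRange (n - 1 - 1) 0 (-1) = (n - 1 - 1) :: PySem.List.pyRange (n - 1 - 1 - 1) 0 (-1) :=
    PySem.List.pyRange_neg_one_cons (by omega)
  have hm : n - 1 - 1 - 1 = ((n - 3).toNat : Int) := by omega
  rw [rotating_factorial, e1, e2, e3, hm,
      PySem.List.enumerate_cons, PySem.List.enumerate_cons, PySem.List.enumerate_cons,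
      List.foldl_cons, List.foldl_cons, List.foldl_cons]
  have s0 : stepA 0 (0, n) = n := by simp [stepA]
  have s1 : stepA n (0 + 1, n - 1) = n * (n - 1) := by norm_num [stepA]
  have s2 : stepA (n * (n - 1)) (0 + 1 + 1, n - 1 - 1) = PySem.Int.floordiv (n * (n - 1)) (n - 2) := by
    norm_num [stepA]
    rw [show n - 1 - 1 = n - 2 by ring]
  rw [s0, s1, s2, show (0:Int) + 1 + 1 + 1 = 3 by norm_num,
      tailFold (n - 3).toNat 3 _ (by omega)]
  set m : Nat := (n - 3).toNat with hmdef
  have hmint : (m : Int) = n - 3 := by omega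
  rw [plusSum_closed m 3 (by omega), minusSum_closed m 3 (by omega), hmint]
  -- align with B
  rw [rotating_factorial_alt]
  simp only [h1, h2, if_false]
  have hmod3 : PySem.Int.mod (n - 3) 4 = (3 + (n - 3) - 3) % 4 := by
    rw [PySem.Int.mod_eq_emod_of_pos (by omega)]; omega
  have hmodn : PySem.Int.mod n 4 = (3 + (n - 3)) % 4 := by
    rw [PySem.Int.mod_eq_emod_of_pos (by omega)]; omega
  rw [← hmod3, ← hmodn]
  -- B caps the minus series at n - 4; bMinus at n - 3: equal since (n-3) % 4 ≠ n % 4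
  have hbridge : bMinus (PySem.Int.mod n 4) (n - 3) = bMinus (PySem.Int.mod n 4) (n - 4) := by
    have hr0 : 0 ≤ PySem.Int.mod n 4 := by rw [hmodn]; omega
    have hr4 : PySem.Int.mod n 4 < 4 := by rw [hmodn]; omega
    have h := bMinus_step (PySem.Int.mod n 4) (n - 4).toNat hr0 hr4
    have hc4 : ((n - 4).toNat : Int) = n - 4 := by omega
    rw [hc4] at h
    have hne : ¬ (n - 4 + 1) % 4 = PySem.Int.mod n 4 := by rw [hmodn]; omega
    rw [show n - 3 = n - 4 + 1 by ring, h, if_neg hne, zero_add]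
  rw [hbridge]
  simp only [bMinus]
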